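-- pv_equiv track=rewrite | github.com/Wytzepakito/hackerRankPython | HackerRank/test_week2_flipping_matrix.py | flippingMatrix
-- ===== SOURCE A (Python) =====
-- def flippingMatrix(matrix):
--     score_mat_size = int(len(matrix)/ 2)
--     final_score = 0
--     mat_size = len(matrix) -1
--
--     for ii in range(score_mat_size):
--         for jj in range(score_mat_size):
--             possibities = [matrix[ii][jj], matrix[ii][mat_size-jj], matrix[mat_size-ii][jj], matrix[mat_size-ii][mat_size-jj]]
--             final_score += max(possibities)
--     return final_score
-- ===== SOURCE B (Python) =====
-- def flippingMatrix(matrix):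
--     n = len(matrix)
--     half = n // 2
--     groups = {}
--     for i in range(n):
--         ki = min(i, n - 1 - i)
--         if half <= ki:
--             continue
--         for j in range(n):
--             kj = min(j, n - 1 - j)
--             if half <= kj:
--                 continue
--             cell = matrix[i][j]
--             groups[(ki, kj)] = max(groups.get((ki, kj), cell), cell)
--     return sum(groups.values())
-- ===== Notes on version B (the rewrite author's own statement) =====
-- stated objective: alternative
-- what changed: B makes one scan over all n*n cells, folding each cell into a dict of per-quadrant-group maxima keyed by (min(i,n-1-i), min(j,n-1-j)) (middle row/column of odd n never passes the key filter), and returns the sum of the dict's values, instead of A's double loop over the top-left quadrant reading the four mirror positions per cell.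
import Mathlib
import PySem

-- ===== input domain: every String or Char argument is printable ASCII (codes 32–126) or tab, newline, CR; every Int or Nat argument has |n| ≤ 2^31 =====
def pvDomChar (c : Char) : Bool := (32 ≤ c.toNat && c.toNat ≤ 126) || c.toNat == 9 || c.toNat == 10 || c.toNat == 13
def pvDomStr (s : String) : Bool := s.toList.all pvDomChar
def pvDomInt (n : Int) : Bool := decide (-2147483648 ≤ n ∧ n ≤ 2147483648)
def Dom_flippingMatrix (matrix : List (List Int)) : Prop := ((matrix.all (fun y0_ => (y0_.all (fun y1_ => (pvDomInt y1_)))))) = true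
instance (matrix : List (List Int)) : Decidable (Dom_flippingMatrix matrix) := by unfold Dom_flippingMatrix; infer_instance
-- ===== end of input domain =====

-- B replaces A's four-mirror-reads-per-quadrant-cell double loop by a single scan over all cells
-- that folds each cell into a dict of per-group maxima (key = canonical mirrored position) and sums
-- the dict's values: an alternative decomposition of the same quadratic computation.


-- ===== PORT A =====
def flippingMatrix (matrix : List (List Int)) : Int :=
  let scoreMatSize : Int := PySem.Int.truncdiv (PySem.List.len matrix) 2  -- int(len(matrix)/2)
  let matSize : Int := PySem.List.len matrix - 1
  (PySem.List.pyRange 0 scoreMatSize 1).foldl (fun finalScore ii =>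
    (PySem.List.pyRange 0 scoreMatSize 1).foldl (fun finalScore jj =>
      let possibities : List Int :=  -- indices valid under Pre_; pyGetD's default is never read there
        [ PySem.List.pyGetD (PySem.List.pyGetD matrix ii []) jj 0
        , PySem.List.pyGetD (PySem.List.pyGetD matrix ii []) (matSize - jj) 0
        , PySem.List.pyGetD (PySem.List.pyGetD matrix (matSize - ii) []) jj 0
        , PySem.List.pyGetD (PySem.List.pyGetD matrix (matSize - ii) []) (matSize - jj) 0 ]
      finalScore + ((PySem.List.max? possibities (fun x => x)).getD 0)) finalScore) 0

-- ===== PORT B =====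
def flippingMatrix_alt (matrix : List (List Int)) : Int :=
  let n : Int := PySem.List.len matrix
  let half : Int := PySem.Int.floordiv n 2
  let groups : PySem.Dict (Int × Int) Int :=
    (PySem.List.pyRange 0 n 1).foldl (fun groups i =>
      let ki : Int := min i (n - 1 - i)
      if half ≤ ki then groups  -- 'continue'
      else
        (PySem.List.pyRange 0 n 1).foldl (fun groups j =>
          let kj : Int := min j (n - 1 - j)
          if half ≤ kj then groups  -- 'continue'
          else
            let cell := PySem.List.pyGetD (PySem.List.pyGetD matrix i []) j 0
            groups.insert (ki, kj) (max (groups.getD (ki, kj) cell) cell))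
        groups)
      PySem.Dict.empty
  (PySem.Dict.values groups).sum

-- ===== PRECONDITION & SPEC =====
-- Pre_ excludes exactly the inputs where Python A raises IndexError: some quadrant row (index
-- < n//2 or ≥ n - n//2, n = len(matrix)) shorter than n; A returns normally on every other
-- input, and Python B reads exactly the same cells, so it raises on the same inputs.
def Pre_flippingMatrix (matrix : List (List Int)) : Prop :=
  ∀ i < matrix.length,
    (i < matrix.length / 2 ∨ matrix.length - matrix.length / 2 ≤ i) →
      matrix.length ≤ (matrix.getD i []).length
instance (matrix : List (List Int)) : Decidable (Pre_flippingMatrix matrix) := by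
  unfold Pre_flippingMatrix; infer_instance

def pvWitness_flippingMatrix : List (List Int) := [[1, 2], [3, 4]]

def Spec_flippingMatrix (matrix : List (List Int)) (out : Int) : Prop := out = flippingMatrix_alt matrix
instance (matrix : List (List Int)) (out : Int) : Decidable (Spec_flippingMatrix matrix out) := by unfold Spec_flippingMatrix; infer_instance

-- ===== CLAIM (what is proved, stated in full; the proofs are below) =====
def Claim_equal_flippingMatrix : Prop := ∀ (matrix : List (List Int)), Dom_flippingMatrix matrix → Pre_flippingMatrix matrix → Spec_flippingMatrix matrix (flippingMatrix matrix)

-- ===== LEMMAS AND PROOFS =====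
-- Reference objects: the cell reader, B's group key, B's per-cell dict update, the flattened list
-- of cells B actually folds over, the canonical key list, and the four-way group maximum.
def pvCell (m : List (List Int)) (i j : Int) : Int :=
  PySem.List.pyGetD (PySem.List.pyGetD m i []) j 0

def pvKey (n i j : Int) : Int × Int := (min i (n - 1 - i), min j (n - 1 - j))

def pvStep (m : List (List Int)) (n : Int) (d : PySem.Dict (Int × Int) Int) (p : Int × Int) :
    PySem.Dict (Int × Int) Int :=
  d.insert (pvKey n p.1 p.2) (max (d.getD (pvKey n p.1 p.2) (pvCell m p.1 p.2)) (pvCell m p.1 p.2))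

def pvL (N : Nat) : List (Int × Int) :=
  (PySem.List.pyRange 0 (N : Int) 1).flatMap (fun i =>
    if min i ((N : Int) - 1 - i) < ((N / 2 : Nat) : Int) then
      ((PySem.List.pyRange 0 (N : Int) 1).filter
        (fun j => decide (min j ((N : Int) - 1 - j) < ((N / 2 : Nat) : Int)))).map (fun j => (i, j))
    else [])

def pvP (N : Nat) : List (Int × Int) :=
  (List.range (N / 2)).flatMap (fun (ii : Nat) =>
    (List.range (N / 2)).map (fun (jj : Nat) => ((ii : Int), (jj : Int))))

def pvQuad (m : List (List Int)) (ii jj : Int) : Int :=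
  max (max (max (pvCell m ii jj) (pvCell m ii ((m.length : Int) - 1 - jj)))
        (pvCell m ((m.length : Int) - 1 - ii) jj))
    (pvCell m ((m.length : Int) - 1 - ii) ((m.length : Int) - 1 - jj))

def pvSum (m : List (List Int)) : Int :=
  ((List.range (m.length / 2)).map (fun (ii : Nat) =>
    ((List.range (m.length / 2)).map (fun (jj : Nat) => pvQuad m ii jj)).sum)).sum

lemma pv_truncdiv_len (n : Nat) : PySem.Int.truncdiv (n : Int) 2 = ((n / 2 : Nat) : Int) := by
  exact Int.mem_toNat?.mp rfl

lemma pvA_eq_pvSum (m : List (List Int)) : flippingMatrix m = pvSum m := by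
  unfold flippingMatrix pvSum
  simp only [PySem.List.len_eq, pv_truncdiv_len, PySem.List.pyRange_one, List.foldl_map,
    PySem.List.foldl_add, Int.sub_zero, Int.toNat_natCast, zero_add]
  apply congrArg
  apply List.map_congr_left
  intro ii hii
  apply congrArg
  apply List.map_congr_left
  intro jj hjj
  simp only [List.mem_range] at hii hjj
  simp only [PySem.List.max?_id_cons, List.foldl, Option.getD_some]
  unfold pvQuad pvCell
  rfl

-- B's port is the fold of pvStep over the flattened executed-cell list pvL.
lemma pvB_eq_foldL (m : List (List Int)) :
    flippingMatrix_alt m =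
      ((pvL m.length).foldl (pvStep m (m.length : Int)) PySem.Dict.empty).values.sum := by
  have hhalf : PySem.Int.floordiv ((m.length : Nat) : Int) 2 = ((m.length / 2 : Nat) : Int) :=
    by exact_mod_cast PySem.Int.floordiv_natCast m.length 2
  unfold flippingMatrix_alt pvL
  simp only [PySem.List.len_eq, hhalf]
  rw [List.foldl_flatMap]
  apply congrArg
  apply congrArg
  apply PySem.List.foldl_congr_mem
  intro d i _
  by_cases hI : min i ((m.length : Int) - 1 - i) < ((m.length / 2 : Nat) : Int)
  · rw [if_neg (show ¬ ((m.length / 2 : Nat) : Int) ≤ min i ((m.length : Int) - 1 - i) by omega),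
      if_pos hI, List.foldl_map, ← PySem.List.foldl_if_eq_foldl_filter]
    apply PySem.List.foldl_congr_mem
    intro d' j _
    by_cases hJ : min j ((m.length : Int) - 1 - j) < ((m.length / 2 : Nat) : Int)
    · rw [if_neg (show ¬ ((m.length / 2 : Nat) : Int) ≤ min j ((m.length : Int) - 1 - j) by omega),
        if_pos (decide_eq_true hJ)]
      rfl
    · rw [if_pos (show ((m.length / 2 : Nat) : Int) ≤ min j ((m.length : Int) - 1 - j) by omega),
        if_neg (by simpa using hJ)]
  · rw [if_pos (show ((m.length / 2 : Nat) : Int) ≤ min i ((m.length : Int) - 1 - i) by omega),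
      if_neg hI]
    rfl

-- Lookup after folding pvStep: only the steps whose key is K matter, folded as a running max.
lemma pv_get?_foldl_step (m : List (List Int)) (n : Int) (l : List (Int × Int))
    (d : PySem.Dict (Int × Int) Int) (K : Int × Int) :
    (l.foldl (pvStep m n) d).get? K =
      (l.filter (fun p => pvKey n p.1 p.2 == K)).foldl
        (fun o p => some (max (o.getD (pvCell m p.1 p.2)) (pvCell m p.1 p.2))) (d.get? K) := by
  induction l generalizing d with
  | nil => rfl
  | cons p t ih =>
    rw [List.foldl_cons, List.filter_cons, ih]
    by_cases h : pvKey n p.1 p.2 = K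
    · rw [if_pos (by simpa using h)]
      rw [List.foldl_cons]
      congr 1
      unfold pvStep
      rw [h, PySem.Dict.get?_insert_self, PySem.Dict.getD_eq_get?_getD]
    · rw [if_neg (by simpa using h)]
      congr 1
      unfold pvStep
      rw [PySem.Dict.get?_insert_of_ne (hne := by simpa using Ne.symm h)]

lemma pv_keys_foldL (m : List (List Int)) (N : Nat) :
    ((pvL N).foldl (pvStep m (N : Int)) PySem.Dict.empty).keys =
      PySem.Set.ofList ((pvL N).map (fun p => pvKey (N : Int) p.1 p.2)) := by
  unfold pvStep
  rw [PySem.Dict.keys_foldl_insert_key]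
  simp [PySem.Set.update_nil_left]

lemma pv_nodup_keys_foldL (m : List (List Int)) (N : Nat) :
    ((pvL N).foldl (pvStep m (N : Int)) PySem.Dict.empty).keys.Nodup := by
  unfold pvStep
  exact PySem.Dict.nodup_keys_foldl_insert_key _ _ _ _ PySem.Dict.nodup_keys_empty

-- generic: a flatMap over range(0,N) whose body is empty except at two points a < b
lemma pv_flatMap_pair {α : Type} (N a b : Int) (g : Int → List α) (h0 : 0 ≤ a) (hab : a < b)
    (hb : b < N) (h : ∀ x, 0 ≤ x → x < N → x ≠ a → x ≠ b → g x = []) :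
    (PySem.List.pyRange 0 N 1).flatMap g = g a ++ g b := by
  rw [PySem.List.pyRange_one_append 0 a N h0 (by omega),
    PySem.List.pyRange_one_append a (a+1) N (by omega) (by omega),
    PySem.List.pyRange_one_append (a+1) b N (by omega) (by omega),
    PySem.List.pyRange_one_append b (b+1) N (by omega) (by omega),
    PySem.List.pyRange_one_singleton]
  simp only [List.flatMap_append, List.flatMap_cons, List.flatMap_nil, List.append_nil]
  have e1 : (PySem.List.pyRange 0 a 1).flatMap g = [] := by
    rw [List.flatMap_eq_nil_iff]
    intro x hx
    rw [PySem.List.mem_pyRange_one] at hx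
    exact h x (by omega) (by omega) (by omega) (by omega)
  have e2 : (PySem.List.pyRange (a+1) b 1).flatMap g = [] := by
    rw [List.flatMap_eq_nil_iff]
    intro x hx
    rw [PySem.List.mem_pyRange_one] at hx
    exact h x (by omega) (by omega) (by omega) (by omega)
  have e3 : (PySem.List.pyRange (b+1) N 1).flatMap g = [] := by
    rw [List.flatMap_eq_nil_iff]
    intro x hx
    rw [PySem.List.mem_pyRange_one] at hx
    exact h x (by omega) (by omega) (by omega) (by omega)
  rw [e1, e2, e3]
  simp

-- generic: a filter over range(0,N) keeping exactly the two points a < b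
lemma pv_filter_pair (N a b : Int) (p : Int → Bool) (h0 : 0 ≤ a) (hab : a < b) (hb : b < N)
    (h : ∀ x, 0 ≤ x → x < N → (p x = true ↔ x = a ∨ x = b)) :
    (PySem.List.pyRange 0 N 1).filter p = [a, b] := by
  rw [PySem.List.pyRange_one_append 0 a N h0 (by omega),
    PySem.List.pyRange_one_append a (a+1) N (by omega) (by omega),
    PySem.List.pyRange_one_append (a+1) b N (by omega) (by omega),
    PySem.List.pyRange_one_append b (b+1) N (by omega) (by omega),
    PySem.List.pyRange_one_singleton]
  simp only [List.filter_append]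
  have e1 : (PySem.List.pyRange 0 a 1).filter p = [] := by
    rw [List.filter_eq_nil_iff]
    intro x hx
    rw [PySem.List.mem_pyRange_one] at hx
    simp only [Bool.not_eq_true]
    rcases Bool.eq_false_or_eq_true (p x) with ht | hf
    · exact absurd ((h x (by omega) (by omega)).mp ht) (by omega)
    · exact hf
  have e2 : (PySem.List.pyRange (a+1) b 1).filter p = [] := by
    rw [List.filter_eq_nil_iff]
    intro x hx
    rw [PySem.List.mem_pyRange_one] at hx
    simp only [Bool.not_eq_true]
    rcases Bool.eq_false_or_eq_true (p x) with ht | hf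
    · exact absurd ((h x (by omega) (by omega)).mp ht) (by omega)
    · exact hf
  have e3 : (PySem.List.pyRange (b+1) N 1).filter p = [] := by
    rw [List.filter_eq_nil_iff]
    intro x hx
    rw [PySem.List.mem_pyRange_one] at hx
    simp only [Bool.not_eq_true]
    rcases Bool.eq_false_or_eq_true (p x) with ht | hf
    · exact absurd ((h x (by omega) (by omega)).mp ht) (by omega)
    · exact hf
  have pa : p a = true := (h a (by omega) (by omega)).mpr (Or.inl rfl)
  have pb : p b = true := (h b (by omega) (by omega)).mpr (Or.inr rfl)
  rw [e1, e2, e3]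
  simp [pa, pb]

-- The steps that touch group (ii, jj) are exactly its four mirror cells, in scan order.
lemma pv_filter_pvL (N : Nat) (ii jj : Nat) (hii : ii < N / 2) (hjj : jj < N / 2) :
    (pvL N).filter (fun p => pvKey (N : Int) p.1 p.2 == ((ii : Int), (jj : Int))) =
      [((ii : Int), (jj : Int)), ((ii : Int), (N : Int) - 1 - jj),
       ((N : Int) - 1 - ii, (jj : Int)), ((N : Int) - 1 - ii, (N : Int) - 1 - jj)] := by
  have hN : 2 ≤ N := by omega
  unfold pvL
  rw [List.filter_flatMap]
  rw [pv_flatMap_pair (N : Int) (ii : Int) ((N : Int) - 1 - ii) _ (by omega)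
    (by omega) (by omega) ?hside]
  case hside =>
    intro x hx0 hxN hxa hxb
    by_cases hc : min x ((N : Int) - 1 - x) < ((N / 2 : Nat) : Int)
    · rw [if_pos hc, List.filter_eq_nil_iff]
      intro p hp
      simp only [List.mem_map] at hp
      obtain ⟨j, _, rfl⟩ := hp
      simp only [pvKey, Bool.not_eq_true, beq_eq_false_iff_ne, ne_eq, Prod.mk.injEq, not_and]
      intro hfst
      exfalso
      omega
    · rw [if_neg hc, List.filter_nil]
  · have c1 : min ((ii : Int)) ((N : Int) - 1 - ii) < ((N / 2 : Nat) : Int) := by push_cast; omega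
    have c2 : min ((N : Int) - 1 - ii) ((N : Int) - 1 - ((N : Int) - 1 - ii)) <
        ((N / 2 : Nat) : Int) := by push_cast; omega
    rw [if_pos c1, if_pos c2, List.filter_map, List.filter_map, List.filter_filter,
      List.filter_filter]
    rw [pv_filter_pair (N : Int) ((jj : Int)) ((N : Int) - 1 - jj) _ (by omega)
      (by omega) (by omega) ?hj1]
    case hj1 =>
      intro x hx0 hxN
      simp only [Function.comp, pvKey, Bool.and_eq_true, decide_eq_true_eq, beq_iff_eq,
        Prod.mk.injEq]
      constructor
      · rintro ⟨⟨h1, h2⟩, h3⟩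
        omega
      · rintro (rfl | rfl) <;> refine ⟨⟨?_, ?_⟩, ?_⟩ <;> push_cast <;> omega
    rw [pv_filter_pair (N : Int) ((jj : Int)) ((N : Int) - 1 - jj) _ (by omega)
      (by omega) (by omega) ?hj2]
    case hj2 =>
      intro x hx0 hxN
      simp only [Function.comp, pvKey, Bool.and_eq_true, decide_eq_true_eq, beq_iff_eq,
        Prod.mk.injEq]
      constructor
      · rintro ⟨⟨h1, h2⟩, h3⟩
        omega
      · rintro (rfl | rfl) <;> refine ⟨⟨?_, ?_⟩, ?_⟩ <;> push_cast <;> omega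
    simp

lemma pv_getD_final (m : List (List Int)) (ii jj : Nat) (hii : ii < m.length / 2)
    (hjj : jj < m.length / 2) :
    ((pvL m.length).foldl (pvStep m (m.length : Int)) PySem.Dict.empty).getD
        ((ii : Int), (jj : Int)) 0 = pvQuad m (ii : Int) (jj : Int) := by
  rw [PySem.Dict.getD_eq_get?_getD, pv_get?_foldl_step, pv_filter_pvL m.length ii jj hii hjj]
  simp only [List.foldl_cons, List.foldl_nil, PySem.Dict.get?_empty, Option.getD_none,
    Option.getD_some, max_self]
  rfl

lemma pv_mem_keys (N : Nat) (K : Int × Int) :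
    K ∈ (pvL N).map (fun p => pvKey (N : Int) p.1 p.2) ↔ K ∈ pvP N := by
  unfold pvL pvP
  simp only [List.mem_map, List.mem_flatMap, List.mem_filter,
    PySem.List.mem_pyRange_one, decide_eq_true_eq, List.mem_ite_nil_right]
  constructor
  · rintro ⟨p, ⟨i, ⟨hi, hki, j, ⟨⟨hj, hkj⟩, rfl⟩⟩⟩, rfl⟩
    have h1 : 0 ≤ min i ((N : Int) - 1 - i) := by omega
    have h2 : 0 ≤ min j ((N : Int) - 1 - j) := by omega
    refine ⟨(min i ((N : Int) - 1 - i)).toNat, ?_, (min j ((N : Int) - 1 - j)).toNat, ?_, ?_⟩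
    · simp only [List.mem_range]; omega
    · simp only [List.mem_range]; omega
    · simp only [pvKey, Prod.mk.injEq]
      constructor <;> omega
  · rintro ⟨a, ⟨ha, b, hb, rfl⟩⟩
    simp only [List.mem_range] at ha hb
    refine ⟨((a : Int), (b : Int)), ⟨(a : Int), ⟨⟨by omega, by omega⟩, by omega,
      (b : Int), ⟨⟨⟨by omega, by omega⟩, by omega⟩, rfl⟩⟩⟩, ?_⟩
    simp only [pvKey, Prod.mk.injEq]
    constructor <;> omega

lemma pv_nodup_P (N : Nat) : (pvP N).Nodup := by
  unfold pvP
  rw [List.nodup_flatMap]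
  constructor
  · intro ii _
    exact (List.nodup_range).map (fun x y h => by simpa using congrArg Prod.snd h)
  · apply List.Pairwise.imp ?_ (List.pairwise_lt_range (n := N / 2))
    intro a b hab x hx hy
    simp only [List.mem_map] at hx hy
    obtain ⟨jx, _, rfl⟩ := hx
    obtain ⟨jy, _, heq⟩ := hy
    have h1 : ((jy : Int), ((a : Int), (jx : Int))).2.1 = (b : Int) := by rw [← heq]
    simp only at h1
    omega

lemma pvB_eq_pvSum (m : List (List Int)) : flippingMatrix_alt m = pvSum m := by
  rw [pvB_eq_foldL,
    PySem.Dict.values_eq_map_keys _ (pv_nodup_keys_foldL m m.length) 0,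
    pv_keys_foldL]
  have hperm : (PySem.Set.ofList ((pvL m.length).map
      (fun p => pvKey ((m.length : Nat) : Int) p.1 p.2))).Perm (pvP m.length) := by
    refine (List.perm_ext_iff_of_nodup (PySem.Set.nodup_ofList _) (pv_nodup_P _)).mpr ?_
    intro K
    rw [PySem.Set.mem_ofList, pv_mem_keys]
  rw [(hperm.map _).sum_eq]
  unfold pvP pvSum
  rw [List.map_flatMap]
  simp only [List.flatMap, List.sum_flatten, List.map_map]
  apply congrArg
  apply List.map_congr_left
  intro ii hii
  simp only [Function.comp]
  apply congrArg
  apply List.map_congr_left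
  intro jj hjj
  simp only [List.mem_range] at hii hjj
  exact pv_getD_final m ii jj hii hjj

-- ===== VERDICT (by name: the statement is the Claim_ definition above) =====
theorem flippingMatrix_spec : Claim_equal_flippingMatrix := by
  intro m _ _
  unfold Spec_flippingMatrix
  rw [pvA_eq_pvSum, pvB_eq_pvSum]
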